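-- pv_equiv track=rewrite | github.com/onrmdc/pergen | tests/test_security_diff_dos.py | _payload_at
-- ===== SOURCE A (Python) =====
-- def _payload_at(target_bytes: int) -> str:
--     """Build a unique-line text body whose UTF-8 byte length is just
--     below ``target_bytes``. Each line is distinct so difflib has no
--     shared anchors to exploit."""
--     lines: list[str] = []
--     total = 0
--     i = 0
--     # Each line is ~48 bytes: "PRE_LINE_<i>_xxxxxxxxxxxxxxxxxxxxxxxxxx\n".
--     pad = "x" * 24
--     while total < target_bytes:
--         line = f"L{i:08d}_{pad}\n"
--         lines.append(line)
--         total += len(line)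
--         i += 1
--         if total + 64 >= target_bytes:
--             break
--     return "".join(lines)[:target_bytes]
-- ===== SOURCE B (Python) =====
-- def _payload_at(target_bytes: int) -> str:
--     """Closed-form line count instead of a running-total loop: each line is
--     exactly 35 bytes, so m = max(1, ceil((target_bytes - 64) / 35))."""
--     if target_bytes <= 0:
--         return ""
--     pad = "x" * 24
--     m = max(1, -((64 - target_bytes) // 35))
--     return "".join(f"L{i:08d}_{pad}\n" for i in range(m))[:target_bytes]
-- ===== Notes on version B (the rewrite author's own statement) =====
-- stated objective: simpler
-- what changed: B replaces A's while-loop with a running byte total and a break by a closed-form line count m = max(1, ceil((target_bytes-64)/35)) (each line is exactly 35 bytes) and joins range(m) lines directly.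
import Mathlib
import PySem

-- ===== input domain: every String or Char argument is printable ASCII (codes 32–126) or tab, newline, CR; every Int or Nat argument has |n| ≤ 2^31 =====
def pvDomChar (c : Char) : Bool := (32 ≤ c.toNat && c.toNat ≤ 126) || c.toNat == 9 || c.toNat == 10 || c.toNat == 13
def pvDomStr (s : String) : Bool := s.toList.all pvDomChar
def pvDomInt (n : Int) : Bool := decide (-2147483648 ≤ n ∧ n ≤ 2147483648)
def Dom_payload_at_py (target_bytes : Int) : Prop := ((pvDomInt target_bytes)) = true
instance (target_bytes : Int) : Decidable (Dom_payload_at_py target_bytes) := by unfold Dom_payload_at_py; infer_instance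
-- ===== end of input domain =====

-- B computes the number of 35-byte lines in closed form instead of A's running-total loop with a break; same return value, no speed claim.

-- ===== PORT A =====
-- f"L{i:08d}_{pad}\n" with pad = "x"*24; for any int i this equals "L" + str(i).zfill(8) + "_" + pad + "\n" (exact, incl. negatives).
def pgMkLine (i : Int) : List Char :=
  'L' :: (PySem.Chars.zfill (PySem.Int.toChars i) 8 ++ '_' :: (List.replicate 24 'x' ++ ['\n']))

-- the while-loop of A: state (lines, total, i); terminates since total grows by the (positive) line length each pass
def pgLoop (t : Int) (lines : List (List Char)) (total i : Int) : List (List Char) :=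
  if _h : total < t then
    let line := pgMkLine i
    let lines' := lines ++ [line]
    let total' := total + PySem.List.len line
    if total' + 64 ≥ t then lines' else pgLoop t lines' total' (i + 1)
  else lines
termination_by (t - total).toNat
decreasing_by simp only [PySem.List.len_eq, pgMkLine, List.length_cons]; omega

def payload_at_py (target_bytes : Int) : String :=
  String.ofList (PySem.List.slice (pgLoop target_bytes [] 0 0).flatten none (some target_bytes))

-- ===== PORT B =====
def payload_at_py_alt (target_bytes : Int) : String :=
  if target_bytes ≤ 0 then "" else
    let m := max 1 (-(PySem.Int.floordiv (64 - target_bytes) 35))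
    String.ofList (PySem.List.slice ((PySem.List.pyRange 0 m 1).map pgMkLine).flatten
      none (some target_bytes))

-- ===== PRECONDITION & SPEC =====
def Spec_payload_at_py (target_bytes : Int) (out : String) : Prop := out = payload_at_py_alt target_bytes
instance (target_bytes : Int) (out : String) : Decidable (Spec_payload_at_py target_bytes out) := by unfold Spec_payload_at_py; infer_instance

-- ===== CLAIM (what is proved, stated in full; the proofs are below) =====
def Claim_equal_payload_at_py : Prop := ∀ (target_bytes : Int), Dom_payload_at_py target_bytes → Spec_payload_at_py target_bytes (payload_at_py target_bytes)

-- ===== LEMMAS AND PROOFS =====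

-- every line built for 0 ≤ i < 10^8 is exactly 35 characters
lemma pgMkLine_length {i : Int} (h0 : 0 ≤ i) (h8 : i < 100000000) :
    (pgMkLine i).length = 35 := by
  have hd : (PySem.Int.toChars i).length ≤ 8 := by
    have : PySem.Int.toChars i = Nat.toDigits 10 i.toNat := by
      simp [PySem.Int.toChars]; omega
    rw [this]
    exact Nat.toDigits_length 10 i.toNat 8 (by norm_num)
      (by omega)
  simp [pgMkLine, PySem.Chars.length_zfill]
  omega

-- the loop, started after k completed iterations, finishes with M lines
lemma pgLoop_eq (t : Int) (M : Nat) (hM8 : M ≤ 100000000) (hM1 : 1 ≤ M)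
    (hub : t ≤ 35 * M + 64) (hlb : ∀ j : Nat, 1 ≤ j → j < M → 35 * (j : Int) + 64 < t) :
    ∀ k : Nat, k < M → 35 * (k : Int) < t →
      pgLoop t ((List.range k).map (fun j : Nat => pgMkLine (j : Int))) (35 * (k : Int)) (k : Int)
        = (List.range M).map (fun j : Nat => pgMkLine (j : Int)) := by
  intro k
  induction hwf : M - k using Nat.strong_induction_on generalizing k with
  | _ n ih =>
  intro hkM hkt
  rw [pgLoop, dif_pos hkt]
  have hlen : PySem.List.len (pgMkLine (k : Int)) = 35 := by
    rw [PySem.List.len_eq, pgMkLine_length (by positivity) (by exact_mod_cast (by omega : k < 100000000))]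
    norm_num
  simp only [hlen]
  have hrange : (List.range k).map (fun j : Nat => pgMkLine (j : Int)) ++ [pgMkLine (k : Int)]
      = (List.range (k + 1)).map (fun j : Nat => pgMkLine (j : Int)) := by
    rw [List.range_succ, List.map_append]; rfl
  by_cases hbrk : 35 * (k : Int) + 35 + 64 ≥ t
  · rw [if_pos hbrk, hrange]
    have : k + 1 = M := by
      by_contra hne
      have hk1M : k + 1 < M := by omega
      have := hlb (k + 1) (by omega) hk1M
      push_cast at this
      omega
    rw [this]
  · rw [if_neg hbrk, hrange]
    have hk1M : k + 1 < M := by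
      by_contra hne
      have : M = k + 1 := by omega
      subst this
      push_cast at hub
      omega
    have h35 : 35 * (k : Int) + 35 = 35 * ((k + 1 : Nat) : Int) := by push_cast; ring
    have hki : (k : Int) + 1 = ((k + 1 : Nat) : Int) := by push_cast; ring
    rw [h35, hki]
    exact ih (M - (k + 1)) (by omega) (k + 1) rfl hk1M (by push_cast; omega)

-- the two line lists coincide
lemma pgLines_eq (t : Int) (hpos : 0 < t) (hdom : t ≤ 2147483648) :
    pgLoop t [] 0 0
      = (PySem.List.pyRange 0 (max 1 (-(PySem.Int.floordiv (64 - t) 35))) 1).map pgMkLine := by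
  set q : Int := PySem.Int.floordiv (64 - t) 35 with hq
  have hdm := PySem.Int.floordiv_mul_add_mod (64 - t) 35
  have hr0 : 0 ≤ PySem.Int.mod (64 - t) 35 := PySem.Int.mod_nonneg _ (by norm_num)
  have hr1 : PySem.Int.mod (64 - t) 35 < 35 := PySem.Int.mod_lt _ (by norm_num)
  set r : Int := PySem.Int.mod (64 - t) 35
  set c : Int := max 1 (-q) with hc
  have hc1 : 1 ≤ c := le_max_left _ _
  set M : Nat := c.toNat with hM
  have hcM : (M : Int) = c := by omega
  have hub : t ≤ 35 * M + 64 := by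
    have : t ≤ 35 * (-q) + 64 := by omega
    have h2 : -q ≤ (M : Int) := by omega
    omega
  have hlb : ∀ j : Nat, 1 ≤ j → j < M → 35 * (j : Int) + 64 < t := by
    intro j hj1 hjM
    have hMq : c = -q := by
      rcases max_cases 1 (-q) with ⟨h1, h2⟩ | ⟨h1, h2⟩ <;> omega
    have : (j : Int) < -q := by omega
    omega
  have hM8 : M ≤ 100000000 := by
    rcases max_cases 1 (-q) with ⟨h1, h2⟩ | ⟨h1, h2⟩ <;> omega
  have hmain := pgLoop_eq t M hM8 (by omega) hub hlb 0 (by omega) (by simpa using hpos)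
  simp only [Nat.cast_zero, mul_zero, List.range_zero, List.map_nil] at hmain
  rw [hmain, PySem.List.pyRange_one, List.map_map]
  have h0 : (c - 0).toNat = M := by omega
  rw [h0]
  simp [Function.comp]

theorem payload_at_py_equal (target_bytes : Int) (hd : Dom_payload_at_py target_bytes) :
    payload_at_py target_bytes = payload_at_py_alt target_bytes := by
  unfold payload_at_py payload_at_py_alt
  by_cases hpos : target_bytes ≤ 0
  · rw [if_pos hpos]
    rw [pgLoop, dif_neg (by omega)]
    simp [PySem.List.slice]
  · rw [if_neg hpos]
    have hdom : target_bytes ≤ 2147483648 := by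
      simp [Dom_payload_at_py, pvDomInt] at hd; omega
    rw [pgLines_eq target_bytes (by omega) hdom]

-- ===== VERDICT (by name: the statement is the Claim_ definition above) =====
theorem payload_at_py_spec : Claim_equal_payload_at_py := by
  intro t hd
  unfold Spec_payload_at_py
  exact payload_at_py_equal t hd
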